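-- pv_equiv track=rewrite | github.com/B-R-H/Toes | reverse bert.py | reverse_bert
-- ===== SOURCE A (Python) =====
-- def reverse_bert(string):
-- 	n = 0
-- 	lower_string = string.lower()
-- 	start_of_berts=[]
-- 	while n<len(string):
-- 		if lower_string[n]=="b":
-- 			if lower_string[n:n+4] == "bert":
-- 				start_of_berts.append(n)
-- 				n+=4
-- 				continue
-- 		n+=1
-- 	if len(start_of_berts)<2:
-- 		return ""
-- 	else:
-- 		ret_string=string[start_of_berts[0]+4:start_of_berts[-1]]
-- 		return ret_string[::-1]
-- ===== SOURCE B (Python) =====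
-- def reverse_bert(string):
--     lower = string.lower()
--     first = lower.find("bert")
--     last = lower.rfind("bert")
--     if first == last:
--         return ""
--     return string[first + 4:last][::-1]
-- ===== Notes on version B (the rewrite author's own statement) =====
-- stated objective: simpler
-- what changed: Replaces the index-stepping scan that collects every occurrence start into a list with a direct computation of just the first and last occurrence via str.find/str.rfind (the pattern cannot overlap itself, so rfind is exactly the scan's last hit), with first==last covering both the no-match and the single-match case.
import Mathlib
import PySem

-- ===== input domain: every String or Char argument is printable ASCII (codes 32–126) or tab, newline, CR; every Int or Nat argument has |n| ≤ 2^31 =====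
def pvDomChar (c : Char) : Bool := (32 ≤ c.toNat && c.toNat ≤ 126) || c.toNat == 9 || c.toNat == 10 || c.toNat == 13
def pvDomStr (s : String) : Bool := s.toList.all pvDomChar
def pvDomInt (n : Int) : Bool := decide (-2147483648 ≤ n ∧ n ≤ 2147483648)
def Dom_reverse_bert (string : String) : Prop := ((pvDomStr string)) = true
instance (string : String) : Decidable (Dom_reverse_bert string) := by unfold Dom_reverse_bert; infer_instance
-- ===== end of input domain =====

-- B replaces A's manual occurrence-collecting scan by find/rfind of "bert" (no self-overlap), for a simpler decomposition.


def bertL : List Char := ['b', 'e', 'r', 't']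

-- ===== PORT A =====
-- the while loop: n is the scan index, acc the collected start positions
def reverseBertLoop (ls : List Char) (len : Nat) (n : Nat) (acc : List Nat) : List Nat :=
  if n < len then
    if PySem.List.pyGetD ls (n : Int) ' ' = 'b' then
      if PySem.List.slice ls (some (n : Int)) (some ((n : Int) + 4)) = bertL then
        reverseBertLoop ls len (n + 4) (acc ++ [n])
      else
        reverseBertLoop ls len (n + 1) acc
    else
      reverseBertLoop ls len (n + 1) acc
  else acc
termination_by len - n

def reverse_bert (string : String) : String :=
  let lower_string := PySem.Chars.lower string.toList
  let start_of_berts := reverseBertLoop lower_string string.toList.length 0 []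
  if start_of_berts.length < 2 then ""
  else
    let ret_string := PySem.List.slice string.toList
      (some (((PySem.List.pyGetD start_of_berts 0 0 : Nat) : Int) + 4))
      (some (((PySem.List.pyGetD start_of_berts (-1) 0 : Nat) : Int)))
    String.ofList ((PySem.List.slice? ret_string none none (-1)).getD [])

-- ===== PORT B =====
def reverse_bert_alt (string : String) : String :=
  let lower := PySem.Chars.lower string.toList
  let first := PySem.Chars.find lower bertL
  let last := PySem.Chars.rfind lower bertL
  if first = last then ""
  else String.ofList ((PySem.List.slice string.toList (some (first + 4)) (some last)).reverse)

-- ===== PRECONDITION & SPEC =====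
def Spec_reverse_bert (string : String) (out : String) : Prop := out = reverse_bert_alt string
instance (string : String) (out : String) : Decidable (Spec_reverse_bert string out) := by unfold Spec_reverse_bert; infer_instance

-- ===== CLAIM (what is proved, stated in full; the proofs are below) =====
def Claim_equal_reverse_bert : Prop := ∀ (string : String), Dom_reverse_bert string → Spec_reverse_bert string (reverse_bert string)

-- ===== LEMMAS AND PROOFS =====

-- all start positions of "bert" in l that are ≥ n, in increasing order
def occsFrom (l : List Char) (n : Nat) : List Nat :=
  if n < l.length then
    if bertL.isPrefixOf (l.drop n) then n :: occsFrom l (n + 1) else occsFrom l (n + 1)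
  else []
termination_by l.length - n

theorem lt_length_of_P {l : List Char} {p : Nat} (h : bertL <+: l.drop p) : p < l.length := by
  have := h.length_le
  simp [bertL] at this
  omega

theorem occs_nil {l : List Char} {n : Nat} (h : l.length ≤ n) : occsFrom l n = [] := by
  unfold occsFrom
  simp [Nat.not_lt.mpr h]

theorem mem_occs {l : List Char} {n p : Nat} :
    p ∈ occsFrom l n ↔ n ≤ p ∧ bertL <+: l.drop p := by
  fun_induction occsFrom l n with
  | case1 n h hpre ih =>
    simp only [List.mem_cons, ih]
    constructor
    · rintro (rfl | ⟨h1, h2⟩)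
      · exact ⟨le_refl _, List.isPrefixOf_iff_prefix.mp hpre⟩
      · exact ⟨by omega, h2⟩
    · rintro ⟨h1, h2⟩
      rcases Nat.eq_or_lt_of_le h1 with rfl | h1'
      · exact Or.inl rfl
      · exact Or.inr ⟨by omega, h2⟩
  | case2 n h hpre ih =>
    rw [ih]
    constructor
    · rintro ⟨h1, h2⟩; exact ⟨by omega, h2⟩
    · rintro ⟨h1, h2⟩
      refine ⟨?_, h2⟩
      rcases Nat.eq_or_lt_of_le h1 with rfl | h1'
      · exact absurd (List.isPrefixOf_iff_prefix.mpr h2) (by simp [hpre])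
      · omega
  | case3 n h =>
    simp only [List.not_mem_nil, false_iff]
    rintro ⟨h1, h2⟩
    exact h (by have := lt_length_of_P h2; omega)

-- "bert" cannot overlap itself: two occurrences are at least 4 apart
theorem nonoverlap {l : List Char} {p q : Nat} (hp : bertL <+: l.drop p)
    (hq : bertL <+: l.drop q) (hlt : p < q) : p + 4 ≤ q := by
  by_contra hcon
  obtain ⟨r, hr⟩ := hp
  have hd : l.drop q = List.drop (q - p) (l.drop p) := by
    rw [List.drop_drop]; congr 1; omega
  rw [hd, ← hr] at hq
  have hle : q - p ≤ bertL.length := by simp [bertL]; omega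
  rw [List.drop_append_of_le_length hle] at hq
  have hb1 : 1 <= q - p := by omega
  have hb3 : q - p <= 3 := by omega
  interval_cases h : (q - p) <;> simp [bertL, List.cons_prefix_cons] at hq

theorem occs_step_not {l : List Char} {m : Nat} (h : ¬ bertL <+: l.drop m) :
    occsFrom l m = occsFrom l (m + 1) := by
  by_cases hm : m < l.length
  · have hf : bertL.isPrefixOf (l.drop m) = false := by
      rw [Bool.eq_false_iff]
      exact fun hh => h (List.isPrefixOf_iff_prefix.mp hh)
    rw [occsFrom]
    simp [hm, hf]
  · rw [occs_nil (by omega), occs_nil (by omega)]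

theorem occs_skip {l : List Char} {n : Nat} (h : bertL <+: l.drop n) :
    occsFrom l (n + 1) = occsFrom l (n + 4) := by
  have k1 : ¬ bertL <+: l.drop (n + 1) := fun hh => by have := nonoverlap h hh (by omega); omega
  have k2 : ¬ bertL <+: l.drop (n + 2) := fun hh => by have := nonoverlap h hh (by omega); omega
  have k3 : ¬ bertL <+: l.drop (n + 3) := fun hh => by have := nonoverlap h hh (by omega); omega
  rw [occs_step_not k1, occs_step_not k2, occs_step_not k3]

theorem P_of_slice {l : List Char} {n : Nat} (_hn : n < l.length)
    (h : PySem.List.slice l (some (n : Int)) (some ((n : Int) + 4)) = bertL) :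
    bertL <+: l.drop n := by
  rw [show ((n : Int) + 4) = ((n : Int) + ((4 : Nat) : Int)) by norm_num,
    PySem.List.slice_natCast_add] at h
  exact List.prefix_iff_eq_take.mpr (by rw [← h]; simp)

theorem slice_of_P {l : List Char} {n : Nat} (h : bertL <+: l.drop n) :
    PySem.List.slice l (some (n : Int)) (some ((n : Int) + 4)) = bertL := by
  rw [show ((n : Int) + 4) = ((n : Int) + ((4 : Nat) : Int)) by norm_num,
    PySem.List.slice_natCast_add]
  have := List.prefix_iff_eq_take.mp h
  simp [bertL] at this ⊢
  exact this.symm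

theorem getD_of_P {l : List Char} {n : Nat} (h : bertL <+: l.drop n) :
    PySem.List.pyGetD l (n : Int) ' ' = 'b' := by
  obtain ⟨r, hr⟩ := h
  have hget : l[n]? = some 'b' := by
    have : l[n]? = (l.drop n)[0]? := by
      rw [show n = n + 0 by omega, List.getElem?_drop]
    rw [this, ← hr]; rfl
  simp [PySem.List.pyGetD_natCast, List.getD, hget]

theorem loop_eq {l : List Char} (len : Nat) (hlen : len = l.length) :
    ∀ (n : Nat) (acc : List Nat), reverseBertLoop l len n acc = acc ++ occsFrom l n := by
  intro n acc
  fun_induction reverseBertLoop l len n acc with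
  | case1 n acc h hb hs ih =>
    have hP : bertL <+: l.drop n := P_of_slice (by omega) hs
    have h1 : occsFrom l n = n :: occsFrom l (n + 4) := by
      rw [occsFrom, if_pos (show n < l.length by omega),
        if_pos (List.isPrefixOf_iff_prefix.mpr hP), occs_skip hP]
    rw [ih, h1]
    simp
  | case2 n acc h hb hs ih =>
    have hP : ¬ bertL <+: l.drop n := fun hh => hs (slice_of_P hh)
    rw [ih, occs_step_not hP]
  | case3 n acc h hb ih =>
    have hP : ¬ bertL <+: l.drop n := fun hh => hb (getD_of_P hh)
    rw [ih, occs_step_not hP]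
  | case4 n acc h =>
    rw [occs_nil (by omega)]; simp

theorem occs_last {l : List Char} :
    ∀ (n m : Nat), (occsFrom l n).getLast? = some m →
      bertL <+: l.drop m ∧ ∀ j, m < j → ¬ bertL <+: l.drop j := by
  intro n
  fun_induction occsFrom l n with
  | case1 n h hpre ih =>
    intro m hm
    rcases heq : occsFrom l (n + 1) with _ | ⟨q, rest⟩
    · rw [heq] at hm
      simp at hm
      subst hm
      refine ⟨List.isPrefixOf_iff_prefix.mp hpre, fun j hj hPj => ?_⟩
      have : j ∈ occsFrom l (n + 1) := mem_occs.mpr ⟨by omega, hPj⟩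
      simp [heq] at this
    · rw [heq, List.getLast?_cons_cons] at hm
      exact ih m (by rw [heq]; exact hm)
  | case2 n h hpre ih => exact ih
  | case3 n h => intro m hm; simp at hm

theorem occs_cons {l : List Char} {n q : Nat} {rest : List Nat}
    (h : occsFrom l n = q :: rest) :
    n ≤ q ∧ bertL <+: l.drop q ∧ rest = occsFrom l (q + 1) := by
  fun_induction occsFrom l n with
  | case1 n hlt hpre ih =>
    injection h with h1 h2
    subst h1; subst h2
    exact ⟨le_refl _, List.isPrefixOf_iff_prefix.mp hpre, rfl⟩
  | case2 n hlt hpre ih =>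
    obtain ⟨h1, h2, h3⟩ := ih h
    exact ⟨by omega, h2, h3⟩
  | case3 n hlt => simp at h

theorem occs_head_find {l : List Char} {a : Nat} {rest : List Nat}
    (h : occsFrom l 0 = a :: rest) : PySem.Chars.find l bertL = (a : Int) := by
  have hPa : bertL <+: l.drop a := (mem_occs.mp (by rw [h]; exact List.mem_cons_self)).2
  have hinfix : PySem.Chars.isIn bertL l = true :=
    (PySem.Chars.exists_prefix_drop_iff_isIn bertL l).mp ⟨a, hPa⟩
  have hne : PySem.Chars.find l bertL ≠ -1 :=
    (PySem.Chars.find_ne_neg_one_iff l bertL).mpr ((PySem.Chars.isIn_iff_infix _ _).mp hinfix)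
  have hge : 0 ≤ PySem.Chars.find l bertL := by
    have := PySem.Chars.neg_one_le_find l bertL; omega
  obtain ⟨hPf, hfmin⟩ := PySem.Chars.find_spec (s := l) (sub := bertL) hge
  have hrest : rest = occsFrom l (a + 1) := (occs_cons h).2.2
  have hamin : ∀ i, i < a → ¬ bertL <+: l.drop i := by
    intro i hi hPi
    have hmem : i ∈ occsFrom l 0 := mem_occs.mpr ⟨by omega, hPi⟩
    rw [h] at hmem
    rcases List.mem_cons.mp hmem with rfl | hmem
    · omega
    · rw [hrest] at hmem
      have := (mem_occs.mp hmem).1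
      omega
  have : (PySem.Chars.find l bertL).toNat = a := by
    by_contra hne2
    rcases Nat.lt_or_ge (PySem.Chars.find l bertL).toNat a with hlt | hge2
    · exact hamin _ hlt hPf
    · exact hfmin a (by omega) hPa
  omega

-- rfind.go unfolding equations
theorem rfind_go_zero (s sub : List Char) :
    PySem.Chars.rfind.go s sub 0 = if sub.isPrefixOf s then 0 else -1 := by
  simp [PySem.Chars.rfind.go]

theorem rfind_go_succ (s sub : List Char) (j : Nat) :
    PySem.Chars.rfind.go s sub (j + 1) =
      if sub.isPrefixOf (s.drop (j + 1)) then ((j : Int) + 1) else PySem.Chars.rfind.go s sub j := by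
  simp [PySem.Chars.rfind.go]

theorem rfind_go_none {l sub : List Char} (h : ∀ j, ¬ sub <+: l.drop j) :
    ∀ k, PySem.Chars.rfind.go l sub k = -1 := by
  intro k
  induction k with
  | zero =>
    rw [rfind_go_zero]
    have : ¬ sub.isPrefixOf l := fun hh => h 0 (List.isPrefixOf_iff_prefix.mp (by simpa using hh))
    simp [this]
  | succ j ih =>
    rw [rfind_go_succ]
    have : ¬ sub.isPrefixOf (l.drop (j + 1)) :=
      fun hh => h (j + 1) (List.isPrefixOf_iff_prefix.mp hh)
    simp [this, ih]

theorem rfind_go_hit {l sub : List Char} {m : Nat} (hP : sub <+: l.drop m)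
    (hmax : ∀ j, m < j → ¬ sub <+: l.drop j) :
    ∀ k, m ≤ k → PySem.Chars.rfind.go l sub k = (m : Int) := by
  intro k
  induction k with
  | zero =>
    intro hk
    have hm : m = 0 := by omega
    subst hm
    rw [rfind_go_zero]
    simp [List.isPrefixOf_iff_prefix.mpr (by simpa using hP)]
  | succ j ih =>
    intro hk
    rw [rfind_go_succ]
    rcases Nat.eq_or_lt_of_le hk with rfl | hlt
    · simp [List.isPrefixOf_iff_prefix.mpr hP]
    · have : ¬ sub.isPrefixOf (l.drop (j + 1)) :=
        fun hh => hmax (j + 1) (by omega) (List.isPrefixOf_iff_prefix.mp hh)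
      simp [this]
      exact ih (by omega)

theorem rfind_eq_of_last {l : List Char} {m : Nat}
    (h : (occsFrom l 0).getLast? = some m) : PySem.Chars.rfind l bertL = (m : Int) := by
  obtain ⟨hPm, hmax⟩ := occs_last 0 m h
  have hmlt : m < l.length := lt_length_of_P hPm
  unfold PySem.Chars.rfind
  exact rfind_go_hit hPm hmax l.length (by omega)

theorem rfind_eq_none {l : List Char} (h : occsFrom l 0 = []) :
    PySem.Chars.rfind l bertL = -1 := by
  have hno : ∀ j, ¬ bertL <+: l.drop j := by
    intro j hPj
    have : j ∈ occsFrom l 0 := mem_occs.mpr ⟨by omega, hPj⟩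
    simp [h] at this
  unfold PySem.Chars.rfind
  exact rfind_go_none hno l.length

theorem find_eq_none {l : List Char} (h : occsFrom l 0 = []) :
    PySem.Chars.find l bertL = -1 := by
  rw [PySem.Chars.find_eq_neg_one_iff]
  intro hinf
  obtain ⟨j, hj⟩ := (PySem.Chars.exists_prefix_drop_iff_isIn bertL l).mpr
    ((PySem.Chars.isIn_iff_infix _ _).mpr hinf)
  have : j ∈ occsFrom l 0 := mem_occs.mpr ⟨by omega, hj⟩
  simp [h] at this

-- ===== VERDICT (by name: the statement is the Claim_ definition above) =====
theorem reverse_bert_spec : Claim_equal_reverse_bert := by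
  intro string _
  unfold Spec_reverse_bert
  simp only [reverse_bert, reverse_bert_alt]
  have hlen : string.toList.length = (PySem.Chars.lower string.toList).length := by
    simp [PySem.Chars.lower]
  rw [loop_eq string.toList.length hlen 0 []]
  simp only [List.nil_append]
  rcases ho : occsFrom (PySem.Chars.lower string.toList) 0 with _ | ⟨a, rest⟩
  · rw [find_eq_none ho, rfind_eq_none ho]
    simp
  · rcases rest with _ | ⟨b, rest'⟩
    · -- exactly one occurrence
      rw [occs_head_find ho, rfind_eq_of_last (by rw [ho]; rfl)]
      simp
    · -- at least two occurrences
      have hne : (a :: b :: rest' : List Nat) ≠ [] := by simp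
      have hlast : (a :: b :: rest').getLast? = some ((a :: b :: rest').getLast hne) :=
        List.getLast?_eq_some_getLast hne
      set m := (a :: b :: rest').getLast hne with hm
      have hrfind := rfind_eq_of_last (by rw [ho]; exact hlast)
      have hfind := occs_head_find ho
      have ham : a + 1 ≤ m := by
        have hmem : m ∈ (b :: rest') := by
          rw [hm, List.getLast_cons (by simp : (b :: rest' : List Nat) ≠ [])]
          exact List.getLast_mem _
        have hrest : (b :: rest') = occsFrom (PySem.Chars.lower string.toList) (a + 1) :=
          (occs_cons ho).2.2
        rw [hrest] at hmem
        exact (mem_occs.mp hmem).1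
      rw [hfind, hrfind, if_neg (by simp), if_neg (by omega),
        PySem.List.pyGetD_zero_cons, PySem.List.pyGetD_neg_one _ 0 hne, ← hm,
        PySem.List.slice?_none_none_neg_one]
      rfl
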